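-- pv_equiv track=rewrite | github.com/TrXuize/project | STEP2/automatic_Label.py | shiftFilename
-- ===== SOURCE A (Python) =====
-- def shiftFilename(filename, shift_right, shift_down):
--     temp = filename.split('.')
--     if len(temp) > 2:
--         newFilename = str(temp[0])
--         for extraPoint in range(1,len(temp)-1):
--             newFilename = newFilename + "." + str(temp[extraPoint])
--         newFilename = newFilename + "_" + str(shift_right) + "_" + str(shift_down) + "_shift" + "." + str(temp[len(temp)-1])
--     else:
--         newFilename = str(temp[0]) + "_" + str(shift_right) + "_" + str(shift_down) + "_shift" + "." + str(temp[1])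
--     return newFilename
-- ===== SOURCE B (Python) =====
-- def shiftFilename(filename, shift_right, shift_down):
--     base, ext = filename.rsplit('.', 1)
--     return base + "_" + str(shift_right) + "_" + str(shift_down) + "_shift." + ext
-- ===== Notes on version B (the rewrite author's own statement) =====
-- stated objective: simpler
-- what changed: B replaces A's split-on-every-dot followed by a branch on the piece count and a loop re-joining the middle pieces with a single right split at the last dot (rsplit('.', 1)) and one formatting expression.
import Mathlib
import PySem

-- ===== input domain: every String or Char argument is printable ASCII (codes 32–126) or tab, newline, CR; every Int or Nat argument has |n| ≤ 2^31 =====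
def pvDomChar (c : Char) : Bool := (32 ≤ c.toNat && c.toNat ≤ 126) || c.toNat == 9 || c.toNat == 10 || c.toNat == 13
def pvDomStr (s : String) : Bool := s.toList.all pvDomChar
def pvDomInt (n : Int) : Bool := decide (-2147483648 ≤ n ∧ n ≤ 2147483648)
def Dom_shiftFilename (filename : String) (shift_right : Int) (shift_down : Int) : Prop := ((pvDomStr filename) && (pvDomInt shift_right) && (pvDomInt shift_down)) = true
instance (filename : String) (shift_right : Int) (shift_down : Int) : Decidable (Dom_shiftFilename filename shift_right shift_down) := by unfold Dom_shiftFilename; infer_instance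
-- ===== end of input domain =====

-- B replaces A's split-at-every-dot + piece-count branch + rejoin loop with a single
-- right split at the last dot (rsplit('.', 1)); objective: simpler. Pre_ excludes
-- dot-free filenames, on which A raises IndexError (B raises ValueError there).

-- ===== PORT A =====
def shiftFilename (filename : String) (shift_right : Int) (shift_down : Int) : String :=
  let temp := PySem.Chars.splitOn filename.toList ['.']
  if temp.length > 2 then
    let newFilename0 := PySem.List.pyGetD temp 0 []
    let newFilename1 := (PySem.List.pyRange 1 ((temp.length : Int) - 1) 1).foldl
      (fun acc j => acc ++ '.' :: PySem.List.pyGetD temp j []) newFilename0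
    String.ofList (newFilename1 ++ '_' :: PySem.Int.toChars shift_right ++
      '_' :: PySem.Int.toChars shift_down ++ "_shift".toList ++
      '.' :: PySem.List.pyGetD temp ((temp.length : Int) - 1) [])
  else
    String.ofList (PySem.List.pyGetD temp 0 [] ++ '_' :: PySem.Int.toChars shift_right ++
      '_' :: PySem.Int.toChars shift_down ++ "_shift".toList ++
      '.' :: PySem.List.pyGetD temp 1 [])

-- ===== PORT B =====
-- hand port of the library call s.rsplit('.', 1): `some (before, after)` split at the
-- LAST '.', `none` exactly when the string has no '.' (where Python's 2-tuple unpack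
-- raises ValueError).  Exact: the deeper (rightmost) match is preferred.
def rsplit1Dot : List Char → Option (List Char × List Char)
  | [] => none
  | c :: rest =>
    match rsplit1Dot rest with
    | some (b, e) => some (c :: b, e)
    | none => if c = '.' then some ([], rest) else none

def shiftFilename_alt (filename : String) (shift_right : Int) (shift_down : Int) : String :=
  match rsplit1Dot filename.toList with
  | some (base, ext) =>
      String.ofList (base ++ '_' :: PySem.Int.toChars shift_right ++
        '_' :: PySem.Int.toChars shift_down ++ "_shift.".toList ++ ext)
  | none => ""  -- unreachable under Pre_ (Python B raises ValueError here)

-- ===== PRECONDITION & SPEC =====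
-- Pre_ excludes exactly the filenames without a '.', on which A raises IndexError.
def Pre_shiftFilename (filename : String) (shift_right : Int) (shift_down : Int) : Prop :=
  PySem.Str.isIn "." filename = true
instance (filename : String) (shift_right : Int) (shift_down : Int) : Decidable (Pre_shiftFilename filename shift_right shift_down) := by unfold Pre_shiftFilename; infer_instance

def pvWitness_shiftFilename : String × Int × Int := ("photo.v2.png", 3, -4)

def Spec_shiftFilename (filename : String) (shift_right : Int) (shift_down : Int) (out : String) : Prop := out = shiftFilename_alt filename shift_right shift_down
instance (filename : String) (shift_right : Int) (shift_down : Int) (out : String) : Decidable (Spec_shiftFilename filename shift_right shift_down out) := by unfold Spec_shiftFilename; infer_instance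

-- ===== CLAIM (what is proved, stated in full; the proofs are below) =====
def Claim_equal_shiftFilename : Prop := ∀ (filename : String) (shift_right : Int) (shift_down : Int), Dom_shiftFilename filename shift_right shift_down → Pre_shiftFilename filename shift_right shift_down → Spec_shiftFilename filename shift_right shift_down (shiftFilename filename shift_right shift_down)

-- ===== LEMMAS AND PROOFS =====

-- structural specification of splitting at every '.' (proof helper only)
def splitDot : List Char → List (List Char)
  | [] => [[]]
  | c :: rest =>
    if c = '.' then [] :: splitDot rest
    else
      match splitDot rest with
      | p :: ps => (c :: p) :: ps
      | [] => [[c]]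

theorem splitDot_ne_nil (cs : List Char) : splitDot cs ≠ [] := by
  induction cs with
  | nil => simp [splitDot]
  | cons c rest ih =>
    simp only [splitDot]
    split_ifs with hc
    · simp
    · cases h : splitDot rest with
      | nil => exact absurd h ih
      | cons p ps => simp

theorem splitOn_go_eq (cs : List Char) : ∀ (fuel : Nat) (cur : List Char) (acc : List (List Char)),
    cs.length ≤ fuel →
    PySem.Chars.splitOn.go ['.'] fuel cs cur acc
      = acc.reverse ++ (match splitDot cs with
        | p :: ps => (cur.reverse ++ p) :: ps
        | [] => []) := by
  induction cs with
  | nil =>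
    intro fuel cur acc _
    cases fuel <;> simp [PySem.Chars.splitOn.go, splitDot]
  | cons c rest ih =>
    intro fuel cur acc hlen
    cases fuel with
    | zero => simp at hlen
    | succ f =>
      rw [PySem.Chars.splitOn.go]
      by_cases hc : c = '.'
      · have hpre : List.isPrefixOf ['.'] (c :: rest) = true := by
          simp [List.isPrefixOf, hc]
        rw [if_pos hpre]
        simp only [List.length_cons, List.length_nil,
          List.drop_succ_cons, List.drop_zero] at hlen ⊢
        rw [ih f [] (cur.reverse :: acc) (by omega)]
        simp only [splitDot]
        simp only [if_pos hc]
        cases h : splitDot rest with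
        | nil => exact absurd h (splitDot_ne_nil rest)
        | cons p ps => simp
      · have hpre : List.isPrefixOf ['.'] (c :: rest) = false := by
          have : ('.' == c) = false := by
            simp only [beq_eq_false_iff_ne, ne_eq]
            exact fun h => hc h.symm
          simp [List.isPrefixOf, this]
        rw [if_neg (by simp [hpre])]
        simp only [List.length_cons] at hlen
        rw [ih f (c :: cur) acc (by omega)]
        simp only [splitDot]
        simp only [if_neg hc]
        cases h : splitDot rest with
        | nil => exact absurd h (splitDot_ne_nil rest)
        | cons p ps => simp

theorem splitOn_eq_splitDot (cs : List Char) :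
    PySem.Chars.splitOn cs ['.'] = splitDot cs := by
  rw [PySem.Chars.splitOn, splitOn_go_eq cs (cs.length + 1) [] [] (by omega)]
  cases h : splitDot cs with
  | nil => exact absurd h (splitDot_ne_nil cs)
  | cons p ps => simp

theorem splitDot_of_no_dot (cs : List Char) (h : '.' ∉ cs) : splitDot cs = [cs] := by
  induction cs with
  | nil => simp [splitDot]
  | cons c rest ih =>
    simp only [List.mem_cons, not_or] at h
    have hc : ¬ (c = '.') := fun hc => h.1 hc.symm
    rw [splitDot.eq_def]
    simp only [if_neg hc, ih h.2]

theorem splitDot_append_dot (xs ys : List Char) :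
    splitDot (xs ++ '.' :: ys) = splitDot xs ++ splitDot ys := by
  induction xs with
  | nil => simp [splitDot]
  | cons c rest ih =>
    simp only [List.cons_append, splitDot, ih]
    split_ifs with hc
    · simp
    · cases h : splitDot rest with
      | nil => exact absurd h (splitDot_ne_nil rest)
      | cons p ps => simp

-- join with '.' as one flattened map
theorem joinDot_eq (p : List Char) (ps : List (List Char)) :
    PySem.Chars.join ['.'] (p :: ps) = p ++ (ps.map (fun q => '.' :: q)).flatten := by
  induction ps generalizing p with
  | nil => simp [PySem.Chars.join_singleton]
  | cons q qs ih =>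
    rw [PySem.Chars.join_cons_cons, ih q]
    simp

theorem joinDot_splitDot (cs : List Char) :
    PySem.Chars.join ['.'] (splitDot cs) = cs := by
  induction cs with
  | nil => simp [splitDot, PySem.Chars.join_singleton]
  | cons c rest ih =>
    simp only [splitDot]
    split_ifs with hc
    · cases h : splitDot rest with
      | nil => exact absurd h (splitDot_ne_nil rest)
      | cons p ps =>
        rw [h] at ih
        rw [PySem.Chars.join_cons_cons, ih, hc]
        simp
    · cases h : splitDot rest with
      | nil => exact absurd h (splitDot_ne_nil rest)
      | cons p ps =>
        rw [h] at ih
        show PySem.Chars.join ['.'] ((c :: p) :: ps) = c :: rest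
        cases ps with
        | nil =>
          simp only [PySem.Chars.join_singleton] at ih ⊢
          simp [ih]
        | cons q qs =>
          rw [PySem.Chars.join_cons_cons] at ih
          rw [PySem.Chars.join_cons_cons]
          simp [ih]

theorem rsplit1Dot_isSome (cs : List Char) (h : '.' ∈ cs) :
    (rsplit1Dot cs).isSome := by
  induction cs with
  | nil => simp at h
  | cons c rest ih =>
    simp only [rsplit1Dot]
    rcases List.mem_cons.mp h with h | h
    · cases hq : rsplit1Dot rest with
      | some p => simp
      | none => simp [← h]
    · have := ih h
      cases hq : rsplit1Dot rest with
      | some p => simp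
      | none => rw [hq] at this; simp at this

theorem rsplit1Dot_some (cs : List Char) (b e : List Char)
    (h : rsplit1Dot cs = some (b, e)) : cs = b ++ '.' :: e ∧ '.' ∉ e := by
  induction cs generalizing b e with
  | nil => simp [rsplit1Dot] at h
  | cons c rest ih =>
    simp only [rsplit1Dot] at h
    cases hr : rsplit1Dot rest with
    | some p =>
      obtain ⟨b', e'⟩ := p
      rw [hr] at h
      simp only [Option.some.injEq, Prod.mk.injEq] at h
      obtain ⟨hb, he⟩ := h
      obtain ⟨h1, h2⟩ := ih b' e' hr
      subst hb he h1
      exact ⟨rfl, h2⟩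
    | none =>
      rw [hr] at h
      split_ifs at h with hc
      · simp only [Option.some.injEq, Prod.mk.injEq] at h
        obtain ⟨hb, he⟩ := h
        subst hb he hc
        refine ⟨rfl, fun hmem => ?_⟩
        have := rsplit1Dot_isSome _ hmem
        rw [hr] at this; simp at this

-- the rejoin loop of A computes the '.'-join of the first k pieces
theorem loop_eq (temp : List (List Char)) (k : Nat) (hk : k ≤ temp.length) (init : List Char) :
    (PySem.List.pyRange 1 (k : Int) 1).foldl
      (fun acc j => acc ++ '.' :: PySem.List.pyGetD temp j []) init
    = init ++ (((temp.drop 1).take (k - 1)).map (fun q => '.' :: q)).flatten := by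
  induction k generalizing init with
  | zero =>
    rw [PySem.List.pyRange_one_eq_nil (by omega)]
    simp
  | succ k ih =>
    by_cases hk0 : k = 0
    · subst hk0
      rw [PySem.List.pyRange_one_eq_nil (by omega)]
      simp
    · have h1 : (1 : Int) ≤ (k : Int) := by omega
      have hcast : ((k + 1 : Nat) : Int) = (k : Int) + 1 := by push_cast; ring
      rw [hcast, PySem.List.pyRange_one_succ_right h1, List.foldl_append,
        ih (by omega)]
      simp only [List.foldl_cons, List.foldl_nil]
      rw [PySem.List.pyGetD_natCast]
      have hklt : k < temp.length := by omega
      have hdl : k - 1 < (temp.drop 1).length := by simp; omega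
      have htake : (temp.drop 1).take (k + 1 - 1) =
          (temp.drop 1).take (k - 1) ++ [(temp.drop 1)[k - 1]] := by
        have : k + 1 - 1 = (k - 1) + 1 := by omega
        rw [this, List.take_add_one, List.getElem?_eq_getElem hdl]
        simp
      rw [htake]
      have hget : (temp.drop 1)[k - 1] = temp.getD k [] := by
        rw [List.getElem_drop]
        have : 1 + (k - 1) = k := by omega
        rw [List.getD_eq_getElem _ _ hklt]
        simp [this]
      rw [hget]
      simp

-- ===== VERDICT (by name: the statement is the Claim_ definition above) =====
theorem shiftFilename_spec : Claim_equal_shiftFilename := by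
  intro f r d _ hpre
  unfold Pre_shiftFilename at hpre
  rw [PySem.Str.isIn_iff_infix] at hpre
  have hmem : '.' ∈ f.toList := (List.singleton_infix_iff _ _).mp (by simpa using hpre)
  obtain ⟨⟨b, e⟩, hbe⟩ := Option.isSome_iff_exists.mp (rsplit1Dot_isSome _ hmem)
  obtain ⟨hcs, hnd⟩ := rsplit1Dot_some _ b e hbe
  unfold Spec_shiftFilename shiftFilename shiftFilename_alt
  rw [hbe]
  simp only [splitOn_eq_splitDot, hcs, splitDot_append_dot, splitDot_of_no_dot e hnd]
  have hb := joinDot_splitDot b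
  cases hsb : splitDot b with
  | nil => exact absurd hsb (splitDot_ne_nil b)
  | cons p ps =>
    rw [hsb] at hb

    rw [joinDot_eq] at hb
    have hshift : "_shift.".toList = "_shift".toList ++ ['.'] := rfl
    cases ps with
    | nil =>
      -- temp = [p, e], length 2: else branch
      have hcond : ¬ (([p] ++ [e]).length > 2) := by
        simp only [List.length_append, List.length_cons, List.length_nil]
        omega
      rw [if_neg hcond]
      simp only [PySem.List.pyGetD_ofNat']
      simp only [List.map_nil, List.flatten_nil, List.append_nil] at hb
      simp [hb, hshift]
    | cons q qs =>
      -- length ≥ 3: then branch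
      have hcond : (p :: (q :: qs) ++ [e]).length > 2 := by
        simp only [List.length_append, List.length_cons, List.length_nil]
        omega
      rw [if_pos hcond]
      have hlen : ((p :: (q :: qs ++ [e])).length : Int) - 1
          = ((qs.length + 2 : Nat) : Int) := by
        simp only [List.length_append, List.length_cons, List.length_nil]
        push_cast
        ring
      simp only [List.cons_append] at hlen ⊢
      rw [hlen, loop_eq _ _ (by simp) _]
      simp only [PySem.List.pyGetD_ofNat', PySem.List.pyGetD_natCast]
      have htake : ((p :: (q :: (qs ++ [e]))).drop 1).take (qs.length + 2 - 1)
          = q :: qs := by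
        simp only [List.drop_succ_cons, List.drop_zero]
        have : qs.length + 2 - 1 = (q :: qs).length := by simp
        rw [this, ← List.cons_append, List.take_left]
      rw [htake]
      have hgetlast : (p :: (q :: (qs ++ [e]))).getD (qs.length + 2) [] = e := by
        have : (p :: (q :: (qs ++ [e]))).getD (qs.length + 2) []
            = (qs ++ [e]).getD qs.length [] := rfl
        rw [this, List.getD_eq_getElem _ _ (by simp)]
        simp
      rw [hgetlast]
      have hget0 : (p :: (q :: (qs ++ [e]))).getD 0 [] = p := rfl
      rw [hget0, hb, hshift]
      simp
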